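-- pv_equiv track=rewrite | github.com/Dunit05/Intro-to-Computer-Science-CSCI-1030U-Lecture-Notes | Study Files/Test 1/index.py | jumpMaximum
-- ===== SOURCE A (Python) =====
-- def jumpMaximum(list):
--     maxVal = list[0]
--     maxPos = 0
--
--     for i in range(1, len(list)):
--         if maxVal < list[i]:
--             maxVal = list[i]
--             maxPos = i
--
--     firstVal = list[0]
--     list[0] = maxVal
--     list[maxPos] = firstVal
--
--     return list
-- ===== SOURCE B (Python) =====
-- def _mx(list, lo, hi):
--     # (max value, index of its first occurrence) on list[lo:hi], by divide and conquer
--     if hi - lo == 1: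
--         return list[lo], lo
--     mid = (lo + hi) // 2
--     lm, lp = _mx(list, lo, mid)
--     rm, rp = _mx(list, mid, hi)
--     return (lm, lp) if rm <= lm else (rm, rp)
--
-- def jumpMaximum(list):
--     first = list[0]
--     m, p = _mx(list, 0, len(list))
--     list[0] = m
--     list[p] = first
--     return list
-- ===== Notes on version B (the rewrite author's own statement) =====
-- stated objective: alternative
-- what changed: Replaces A's left-to-right max-tracking loop with a divide-and-conquer recursion that finds (max, first index) by splitting the list in half and merging with a leftmost-on-tie rule, then does the same front swap.
import Mathlib
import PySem

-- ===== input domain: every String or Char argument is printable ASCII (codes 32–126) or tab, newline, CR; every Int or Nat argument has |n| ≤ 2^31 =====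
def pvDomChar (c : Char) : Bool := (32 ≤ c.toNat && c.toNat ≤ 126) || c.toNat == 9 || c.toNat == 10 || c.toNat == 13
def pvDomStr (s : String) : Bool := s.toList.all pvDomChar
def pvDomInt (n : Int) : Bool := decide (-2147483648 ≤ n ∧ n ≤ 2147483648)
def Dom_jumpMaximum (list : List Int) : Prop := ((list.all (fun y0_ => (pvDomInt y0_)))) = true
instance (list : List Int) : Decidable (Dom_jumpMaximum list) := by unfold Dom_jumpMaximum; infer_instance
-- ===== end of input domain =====

-- B finds (max, first index) by divide-and-conquer (halving recursion, leftmost-on-tie merge)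
-- instead of A's left-to-right max-tracking loop; both then swap that element to the front.
-- Both Pythons mutate the argument list in place the same way; the theorem is about the
-- returned value. Pre_ excludes only the empty list, where both Pythons raise IndexError.


-- ===== PORT A =====
-- maxVal = list[0]; maxPos = 0; for i in range(1, len(list)): if maxVal < list[i]: update;
-- firstVal = list[0]; list[0] = maxVal; list[maxPos] = firstVal; return list
-- (value on [] is irrelevant: Pre_ excludes it, Python raises IndexError there)
def jumpMaximum (list : List Int) : List Int :=
  match list with
  | [] => []
  | x :: xs =>
    let l := x :: xs
    let st := (PySem.List.pyRange 1 (l.length : Int) 1).foldl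
      (fun (st : Int × Int) i =>
        if st.1 < PySem.List.pyGetD l i 0 then (PySem.List.pyGetD l i 0, i) else st)
      (x, 0)
    let firstVal := x
    PySem.List.pySetD (PySem.List.pySetD l 0 st.1) st.2 firstVal

-- ===== PORT B =====
-- _mx(list, lo, hi): if hi - lo == 1: return list[lo], lo
--   mid = (lo+hi)//2; recurse on both halves; keep the left pair on ties (rm <= lm).
-- The 'hi - lo ≤ 1' guard (vs Python's '== 1') only makes the recursion total; the two
-- agree on every call reachable from jumpMaximum_alt (which always has lo < hi).
def mxRec (l : List Int) (lo hi : Int) : Int × Int :=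
  if _h : hi - lo ≤ 1 then (PySem.List.pyGetD l lo 0, lo)
  else
    let mid := PySem.Int.floordiv (lo + hi) 2
    let L := mxRec l lo mid
    let R := mxRec l mid hi
    if R.1 ≤ L.1 then L else R
termination_by (hi - lo).toNat
decreasing_by
  · have := PySem.Int.floordiv_eq_ediv_of_pos (a := lo + hi) (b := 2) (by omega)
    omega
  · have := PySem.Int.floordiv_eq_ediv_of_pos (a := lo + hi) (b := 2) (by omega)
    omega

-- first = list[0]; m, p = _mx(list, 0, len(list)); list[0] = m; list[p] = first; return list
def jumpMaximum_alt (list : List Int) : List Int :=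
  match list with
  | [] => []
  | x :: xs =>
    let l := x :: xs
    let first := x
    let mp := mxRec l 0 (l.length : Int)
    PySem.List.pySetD (PySem.List.pySetD l 0 mp.1) mp.2 first

-- ===== PRECONDITION & SPEC =====
-- A raises IndexError on the empty list (list[0]); Pre_ excludes exactly that input.
def Pre_jumpMaximum (list : List Int) : Prop := list ≠ []
instance (list : List Int) : Decidable (Pre_jumpMaximum list) := by unfold Pre_jumpMaximum; infer_instance
def pvWitness_jumpMaximum : List Int := [3, 1, 7, 7, 2]

def Spec_jumpMaximum (list : List Int) (out : List Int) : Prop := out = jumpMaximum_alt list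
instance (list : List Int) (out : List Int) : Decidable (Spec_jumpMaximum list out) := by unfold Spec_jumpMaximum; infer_instance

-- ===== CLAIM (what is proved, stated in full; the proofs are below) =====
def Claim_equal_jumpMaximum : Prop := ∀ (list : List Int), Dom_jumpMaximum list → Pre_jumpMaximum list → Spec_jumpMaximum list (jumpMaximum list)

-- ===== LEMMAS AND PROOFS =====

/-- `(m, p)` is the maximum of `l` on indices `[lo, hi)` together with the FIRST index
attaining it: exactly what both programs compute for that segment. -/
def GoodSeg (l : List Int) (lo hi m p : Int) : Prop :=
  lo ≤ p ∧ p < hi ∧ PySem.List.pyGetD l p 0 = m ∧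
  (∀ j, lo ≤ j → j < hi → PySem.List.pyGetD l j 0 ≤ m) ∧
  (∀ j, lo ≤ j → j < p → PySem.List.pyGetD l j 0 < m)

lemma goodSeg_unique {l : List Int} {lo hi m p m' p' : Int}
    (h : GoodSeg l lo hi m p) (h' : GoodSeg l lo hi m' p') : m = m' ∧ p = p' := by
  obtain ⟨hp1, hp2, hv, hmax, hfst⟩ := h
  obtain ⟨hp1', hp2', hv', hmax', hfst'⟩ := h'
  have hm : m = m' := le_antisymm (hv ▸ hmax' p hp1 hp2) (hv' ▸ hmax p' hp1' hp2')
  refine ⟨hm, ?_⟩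
  rcases lt_trichotomy p p' with h | h | h
  · exact absurd (hm ▸ hv ▸ hfst' p hp1 h) (lt_irrefl _)
  · exact h
  · exact absurd (hm ▸ hv' ▸ hfst p' hp1' h) (lt_irrefl _)

/-- Pure recursion mirroring A's loop state: (current max, its position), next index. -/
def findMax : List Int → Int → Int → Int → Int × Int
  | [], m, p, _ => (m, p)
  | y :: ys, m, p, i => if m < y then findMax ys y i (i + 1) else findMax ys m p (i + 1)

/-- A's index fold over the tail of `l` is `findMax`. -/
lemma foldA (l : List Int) :
    ∀ (ys : List Int) (i : Int) (st : Int × Int), 0 ≤ i → l.drop i.toNat = ys →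
    (PySem.List.pyRange i (l.length : Int) 1).foldl
      (fun (st : Int × Int) j =>
        if st.1 < PySem.List.pyGetD l j 0 then (PySem.List.pyGetD l j 0, j) else st) st
    = findMax ys st.1 st.2 i := by
  intro ys
  induction ys with
  | nil =>
    intro i st hi hd
    have hlen : (l.length : Int) ≤ i := by
      have := List.drop_eq_nil_iff.mp hd
      omega
    rw [PySem.List.pyRange_one_eq_nil hlen]
    simp [findMax]
  | cons y ys ih =>
    intro i st hi hd
    have hlt : i.toNat < l.length := by
      by_contra h
      rw [List.drop_eq_nil_of_le (by omega)] at hd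
      exact (List.cons_ne_nil y ys) hd.symm
    have hib : i < (l.length : Int) := by omega
    rw [PySem.List.pyRange_one_cons hib]
    have hget : PySem.List.pyGetD l i 0 = y := by
      have h0 : (l.drop i.toNat)[0]? = some y := by rw [hd]; rfl
      rw [List.getElem?_drop] at h0
      simp only [Nat.add_zero] at h0
      rw [PySem.List.pyGetD_of_nonneg _ _ hi]
      simp [List.getD, h0]
    have hd' : l.drop (i + 1).toNat = ys := by
      have : (i + 1).toNat = i.toNat + 1 := by omega
      rw [this, ← List.drop_drop, hd]
      rfl
    rw [List.foldl_cons, hget]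
    by_cases h : st.1 < y
    · rw [if_pos h, ih (i + 1) (y, i) (by omega) hd']
      simp [findMax, h]
    · rw [if_neg h, ih (i + 1) st (by omega) hd']
      simp [findMax, h]

/-- A's scan invariant: starting from a pair that is Good for the prefix `[0, i)`,
`findMax` over the rest yields a pair Good for the whole list. -/
lemma findMax_good (l : List Int) :
    ∀ (ys : List Int) (m p i : Int), l.drop i.toNat = ys → i ≤ (l.length : Int) →
    GoodSeg l 0 i m p →
    GoodSeg l 0 (l.length : Int) (findMax ys m p i).1 (findMax ys m p i).2 := by
  intro ys
  induction ys with
  | nil =>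
    intro m p i hd hle hg
    have hpos : 0 < i := lt_of_le_of_lt hg.1 hg.2.1
    have : (l.length : Int) ≤ i := by
      have := List.drop_eq_nil_iff.mp hd
      omega
    have hi : i = (l.length : Int) := le_antisymm hle this
    simpa [findMax, hi] using hg
  | cons y ys ih =>
    intro m p i hd hle hg
    obtain ⟨hp1, hp2, hv, hmax, hfst⟩ := hg
    have hi0 : 0 ≤ i := le_trans hp1 (le_of_lt hp2)
    have hlt : i.toNat < l.length := by
      by_contra h
      rw [List.drop_eq_nil_of_le (by omega)] at hd
      exact (List.cons_ne_nil y ys) hd.symm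
    have hget : PySem.List.pyGetD l i 0 = y := by
      have h0 : (l.drop i.toNat)[0]? = some y := by rw [hd]; rfl
      rw [List.getElem?_drop] at h0
      simp only [Nat.add_zero] at h0
      rw [PySem.List.pyGetD_of_nonneg _ _ hi0]
      simp [List.getD, h0]
    have hd' : l.drop (i + 1).toNat = ys := by
      have : (i + 1).toNat = i.toNat + 1 := by omega
      rw [this, ← List.drop_drop, hd]
      rfl
    have hle' : i + 1 ≤ (l.length : Int) := by omega
    simp only [findMax]
    by_cases h : m < y
    · rw [if_pos h]
      refine ih y i (i + 1) hd' hle' ⟨by omega, by omega, hget, ?_, ?_⟩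
      · intro j hj1 hj2
        rcases lt_or_ge j i with hj | hj
        · exact le_of_lt (lt_of_le_of_lt (hmax j hj1 hj) h)
        · have : j = i := by omega
          rw [this, hget]
      · intro j hj1 hj2
        exact lt_of_le_of_lt (hmax j hj1 hj2) h
    · rw [if_neg h]
      refine ih m p (i + 1) hd' hle' ⟨hp1, by omega, hv, ?_, hfst⟩
      intro j hj1 hj2
      rcases lt_or_ge j i with hj | hj
      · exact hmax j hj1 hj
      · have : j = i := by omega
        rw [this, hget]; omega

/-- B's divide-and-conquer returns the Good pair of its segment. -/
lemma mxRec_good (l : List Int) : ∀ (n : Nat) (lo hi : Int), (hi - lo).toNat = n →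
    0 ≤ lo → lo < hi → hi ≤ (l.length : Int) →
    GoodSeg l lo hi (mxRec l lo hi).1 (mxRec l lo hi).2 := by
  intro n
  induction n using Nat.strong_induction_on with
  | _ n ih =>
    intro lo hi hn h0 hlt hle
    rw [mxRec]
    by_cases h1 : hi - lo ≤ 1
    · have hhi : hi = lo + 1 := by omega
      rw [dif_pos h1]
      refine ⟨le_refl _, by omega, rfl, ?_, by omega⟩
      intro j hj1 hj2
      have : j = lo := by omega
      rw [this]
    · rw [dif_neg h1]
      have hmid : PySem.Int.floordiv (lo + hi) 2 = (lo + hi) / 2 :=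
        PySem.Int.floordiv_eq_ediv_of_pos (by omega)
      set mid := PySem.Int.floordiv (lo + hi) 2 with hmiddef
      have hb1 : lo < mid := by omega
      have hb2 : mid < hi := by omega
      have hL := ih (mid - lo).toNat (by omega) lo mid rfl h0 hb1 (by omega)
      have hR := ih (hi - mid).toNat (by omega) mid hi rfl (by omega) hb2 hle
      obtain ⟨la, lb, lc, ld, le'⟩ := hL
      obtain ⟨ra, rb, rc, rd, re⟩ := hR
      by_cases h : (mxRec l mid hi).1 ≤ (mxRec l lo mid).1
      · rw [if_pos h]
        refine ⟨la, by omega, lc, ?_, ?_⟩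
        · intro j hj1 hj2
          rcases lt_or_ge j mid with hj | hj
          · exact ld j hj1 hj
          · exact le_trans (rd j hj hj2) h
        · exact le'
      · rw [if_neg h]
        rw [not_le] at h
        refine ⟨by omega, rb, rc, ?_, ?_⟩
        · intro j hj1 hj2
          rcases lt_or_ge j mid with hj | hj
          · exact le_of_lt (lt_of_le_of_lt (ld j hj1 hj) h)
          · exact rd j hj hj2
        · intro j hj1 hj2
          rcases lt_or_ge j mid with hj | hj
          · exact lt_of_le_of_lt (ld j hj1 hj) h
          · exact re j hj hj2

-- ===== VERDICT (by name: the statement is the Claim_ definition above) =====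
theorem jumpMaximum_spec : Claim_equal_jumpMaximum := by
  intro list _ hpre
  match list with
  | [] => exact absurd rfl hpre
  | x :: xs =>
    unfold Spec_jumpMaximum jumpMaximum jumpMaximum_alt
    simp only
    set l := x :: xs with hl
    have hx0 : PySem.List.pyGetD l 0 0 = x := by
      rw [hl]; exact PySem.List.pyGetD_zero_cons x xs 0
    have hg0 : GoodSeg l 0 1 x 0 := by
      refine ⟨le_refl _, by omega, hx0, ?_, by omega⟩
      intro j hj1 hj2
      have : j = 0 := by omega
      rw [this, hx0]
    have hd1 : l.drop (1 : Int).toNat = xs := by rw [hl]; rfl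
    have hlen1 : (1 : Int) ≤ (l.length : Int) := by simp [hl]
    have hA := findMax_good l xs x 0 1 hd1 hlen1 hg0
    have hB := mxRec_good l (l.length) 0 (l.length : Int) (by omega) (le_refl _)
      (by simp [hl]) (le_refl _)
    have hfold := foldA l xs 1 (x, 0) (by omega) hd1
    obtain ⟨hm, hp⟩ := goodSeg_unique hA hB
    rw [hfold, hm, hp]
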